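-- pv_equiv track=rewrite | github.com/schnebeck/KPaperFlux | scripts/patch_demo_invoices.py | generate_valid_iban
-- ===== SOURCE A (Python) =====
-- def generate_valid_iban(country_code, bban):
--     """Calculates valid IBAN for test purposes (mod 97)."""
--     # Convert CC to numeric (A=10, ..., Z=35). CC00 at the end.
--     chars = country_code + "00"
--     suffix = ""
--     for c in chars:
--         if c.isdigit():
--             suffix += c
--         else:
--             suffix += str(ord(c.upper()) - 55)
--
--     num_str = bban + suffix
--     checksum = 98 - (int(num_str) % 97)
--     return f"{country_code}{checksum:02d}{bban}"
-- ===== SOURCE B (Python) =====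
-- def generate_valid_iban(country_code, bban):
--     """Calculates valid IBAN for test purposes (mod 97) by a streaming mod-97 fold."""
--     rem = 0
--     for ch in bban:
--         rem = (rem * 10 + int(ch)) % 97
--     for c in country_code + "00":
--         if c.isdigit():
--             rem = (rem * 10 + int(c)) % 97
--         else:
--             for d in str(ord(c.upper()) - 55):
--                 rem = (rem * 10 + int(d)) % 97
--     checksum = 98 - rem
--     return f"{country_code}{checksum:02d}{bban}"
-- ===== Notes on version B (the rewrite author's own statement) =====
-- stated objective: alternative
-- what changed: Instead of concatenating bban and the converted country tail into one huge decimal string and taking int(num_str) % 97, B streams over the same characters keeping only a running remainder rem = (rem*10 + int(ch)) % 97, so no big integer or long string is ever built.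
-- outside the precondition, e.g. on generate_valid_iban('DE', ' 7'): A returns 'DE41 7', B raises ValueError; on generate_valid_iban(' ', ''): A returns ' 70', B raises ValueError; on generate_valid_iban('DE', '1_2'): A returns 'DE031_2', B raises ValueError
import Mathlib
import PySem

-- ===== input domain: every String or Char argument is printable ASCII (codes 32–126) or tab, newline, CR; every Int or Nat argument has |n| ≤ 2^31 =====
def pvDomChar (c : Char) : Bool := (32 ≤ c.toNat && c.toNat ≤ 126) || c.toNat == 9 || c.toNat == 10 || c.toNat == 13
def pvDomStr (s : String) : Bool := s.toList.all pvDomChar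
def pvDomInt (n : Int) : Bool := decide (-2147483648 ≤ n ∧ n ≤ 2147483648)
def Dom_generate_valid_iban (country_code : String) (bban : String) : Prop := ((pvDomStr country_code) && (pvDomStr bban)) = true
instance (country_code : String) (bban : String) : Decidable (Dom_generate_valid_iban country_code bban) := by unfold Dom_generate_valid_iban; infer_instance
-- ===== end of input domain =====

-- B replaces A's "concatenate everything into one huge decimal string and take int(...) % 97"
-- by a streaming mod-97 fold over the same characters (objective: alternative; return value only).

-- ===== PORT A =====
-- int(s) is ported BY HAND below (pvInt?): it mirrors CPython 3.11's int() step for step —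
-- strip int-whitespace on both ends, optional sign, digits with single '_' separators between
-- digits, and the 4300-digit conversion limit (sys.get_int_max_str_digits()) — because the
-- digit parser inside PySem.Int.ofChars? is private to the prelude, so no proof can unfold it.
-- It is exact on the inputs this file's claims cover (inside Pre_ the parsed string is all digits).

-- CPython digit run: d ( '_'? d )*  (accumulating left-to-right)
def pvDigitsGo (acc : Nat) : List Char → Option Nat
  | [] => some acc
  | c :: rest =>
      if c.isDigit then pvDigitsGo (10 * acc + (c.toNat - 48)) rest
      else if c = '_' then
        match rest with
        | c2 :: rest2 => if c2.isDigit then pvDigitsGo (10 * acc + (c2.toNat - 48)) rest2 else none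
        | [] => none
      else none

def pvDigits? : List Char → Option Nat
  | [] => none
  | c :: rest => if c.isDigit then pvDigitsGo (c.toNat - 48) rest else none

-- int(s): whitespace, sign, digit run, and Python 3.11's 4300-digit limit; none = ValueError
def pvInt? (cs : List Char) : Option Int :=
  let t := (List.dropWhile PySem.Int.isIntSpace ((List.dropWhile PySem.Int.isIntSpace cs).reverse)).reverse
  let body : List Char → Option Int := fun ds =>
    if 4300 < (ds.filter (fun c => c ≠ '_')).length then none
    else (pvDigits? ds).map (fun n => (n : Int))
  match t with
  | c :: ds =>
      if c = '-' then (body ds).map (fun n => -n)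
      else if c = '+' then body ds
      else body (c :: ds)
  | [] => none

-- 'country_code + "00"' iterated char by char: .toList ++ ['0','0']
def generate_valid_iban (country_code : String) (bban : String) : String :=
  let chars := country_code.toList ++ ['0', '0']
  let suffix := chars.foldl (fun acc c =>
    if PySem.Chars.isdigit c then acc ++ [c]
    else acc ++ PySem.Int.toChars (((PySem.Chars.upperChar c).toNat : Int) - 55)) []
  let num_str := bban.toList ++ suffix
  match pvInt? num_str with
  | some n =>
      let checksum : Int := 98 - PySem.Int.mod n 97
      -- f"{country_code}{checksum:02d}{bban}" (zfill to width 2 = :02d here)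
      String.ofList (country_code.toList ++ PySem.Chars.zfill (PySem.Int.toChars checksum) 2 ++ bban.toList)
  | none => ""   -- int() raises ValueError here; excluded by Pre_

-- ===== PORT B =====
-- rem = (rem * 10 + int(ch)) % 97, None = the ValueError int() raises on a non-digit char
def pvStep (r : Option Int) (ch : Char) : Option Int :=
  match r, pvInt? [ch] with
  | some rem, some d => some (PySem.Int.mod (rem * 10 + d) 97)
  | _, _ => none

def generate_valid_iban_alt (country_code : String) (bban : String) : String :=
  let r1 := bban.toList.foldl pvStep (some 0)
  let r2 := (country_code.toList ++ ['0', '0']).foldl (fun r c =>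
      if PySem.Chars.isdigit c then pvStep r c
      else (PySem.Int.toChars (((PySem.Chars.upperChar c).toNat : Int) - 55)).foldl pvStep r) r1
  match r2 with
  | some rem =>
      String.ofList (country_code.toList ++ PySem.Chars.zfill (PySem.Int.toChars (98 - rem)) 2 ++ bban.toList)
  | none => ""   -- int() raises ValueError here; excluded by Pre_

-- ===== PRECONDITION & SPEC =====
-- digits contributed to the numeric string by one country_code character:
-- 1 for a digit, else len(str(ord(c.upper()) - 55)) (1 below 65, else 2 on this domain)
def pvExpLen (c : Char) : Nat :=
  if 48 ≤ c.toNat ∧ c.toNat ≤ 57 then 1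
  else if (if 97 ≤ c.toNat ∧ c.toNat ≤ 122 then c.toNat - 32 else c.toNat) < 65 then 1 else 2

-- Pre_ excludes exactly (i) inputs where A's int() raises ValueError: a bban that is not pure
-- digits, a country_code character below '0' (its ord(upper)-55 tail goes negative), or a numeric
-- string over CPython's 4300-digit int-conversion limit; and (ii) the few lenient-int() forms
-- (whitespace/sign/underscore in bban, a sub-'0' country character absorbed as a leading sign)
-- on which A still returns but B's per-character int() naturally raises — see the cites.
def Pre_generate_valid_iban (country_code : String) (bban : String) : Prop :=
  country_code.toList.all (fun c => 48 ≤ c.toNat) = true ∧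
  bban.toList.all Char.isDigit = true ∧
  bban.toList.length + ((country_code.toList ++ ['0', '0']).map pvExpLen).sum ≤ 4300

instance (country_code : String) (bban : String) : Decidable (Pre_generate_valid_iban country_code bban) := by
  unfold Pre_generate_valid_iban; infer_instance

def pvWitness_generate_valid_iban : String × String := ("DE", "123")

def Spec_generate_valid_iban (country_code : String) (bban : String) (out : String) : Prop := out = generate_valid_iban_alt country_code bban
instance (country_code : String) (bban : String) (out : String) : Decidable (Spec_generate_valid_iban country_code bban out) := by unfold Spec_generate_valid_iban; infer_instance

-- ===== CLAIM (what is proved, stated in full; the proofs are below) =====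
def Claim_equal_generate_valid_iban : Prop := ∀ (country_code : String) (bban : String), Dom_generate_valid_iban country_code bban → Pre_generate_valid_iban country_code bban → Spec_generate_valid_iban country_code bban (generate_valid_iban country_code bban)

-- ===== LEMMAS AND PROOFS =====

-- the per-character expansion both programs apply to country_code + "00"
def pvExp (c : Char) : List Char :=
  if PySem.Chars.isdigit c then [c]
  else PySem.Int.toChars (((PySem.Chars.upperChar c).toNat : Int) - 55)

-- ---- character facts ----
theorem pv_isDigit_iff (c : Char) : c.isDigit = true ↔ 48 ≤ c.toNat ∧ c.toNat ≤ 57 := by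
  simp only [Char.isDigit, Bool.and_eq_true, decide_eq_true_eq, Char.toNat]
  constructor
  · rintro ⟨h1, h2⟩; exact ⟨UInt32.le_iff_toNat_le.mp h1, UInt32.le_iff_toNat_le.mp h2⟩
  · rintro ⟨h1, h2⟩; exact ⟨UInt32.le_iff_toNat_le.mpr h1, UInt32.le_iff_toNat_le.mpr h2⟩

theorem pv_isdigit_iff (c : Char) : PySem.Chars.isdigit c = true ↔ 48 ≤ c.toNat ∧ c.toNat ≤ 57 := by
  simp only [PySem.Chars.isdigit, Bool.and_eq_true, decide_eq_true_eq, Char.le_def]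
  constructor
  · rintro ⟨h1, h2⟩; exact ⟨UInt32.le_iff_toNat_le.mp h1, UInt32.le_iff_toNat_le.mp h2⟩
  · rintro ⟨h1, h2⟩; exact ⟨UInt32.le_iff_toNat_le.mpr h1, UInt32.le_iff_toNat_le.mpr h2⟩

theorem pv_upper_toNat (c : Char) (h : c.toNat ≤ 126) :
    (PySem.Chars.upperChar c).toNat = if 97 ≤ c.toNat ∧ c.toNat ≤ 122 then c.toNat - 32 else c.toNat := by
  simp only [PySem.Chars.upperChar, PySem.Chars.islower, Bool.and_eq_true, decide_eq_true_eq, Char.le_def]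
  split
  · rename_i hl
    obtain ⟨h1, h2⟩ := hl
    have h1' : 97 ≤ c.toNat := UInt32.le_iff_toNat_le.mp h1
    have h2' : c.toNat ≤ 122 := UInt32.le_iff_toNat_le.mp h2
    rw [if_pos ⟨h1', h2'⟩, Char.toNat_ofNat]
    rw [if_pos]; left; omega
  · rename_i hl
    rw [if_neg]
    intro ⟨h1, h2⟩
    exact hl ⟨UInt32.le_iff_toNat_le.mpr h1, UInt32.le_iff_toNat_le.mpr h2⟩

theorem pv_toDigits_facts : ∀ k < 72, 3 ≤ k →
    ((Nat.toDigits 10 k).all Char.isDigit ∧ (Nat.toDigits 10 k).length = (if k < 10 then 1 else 2)) := by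
  decide

theorem pv_digit_ne (c : Char) (h : c.isDigit = true) :
    c ≠ '-' ∧ c ≠ '+' ∧ c ≠ '_' ∧ PySem.Int.isIntSpace c = false := by
  refine ⟨?_, ?_, ?_, ?_⟩
  · rintro rfl; simp at h
  · rintro rfl; simp at h
  · rintro rfl; simp at h
  · simp only [PySem.Int.isIntSpace, Bool.or_eq_false_iff, decide_eq_false_iff_not]
    refine ⟨⟨⟨⟨⟨?_,?_⟩,?_⟩,?_⟩,?_⟩,?_⟩ <;> rintro rfl <;> simp at h

-- ---- the hand-ported int() on an all-digit string parses to the decimal fold ----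
theorem pv_go_digits : ∀ (ds : List Char) (acc : Nat), (∀ c ∈ ds, c.isDigit = true) →
    pvDigitsGo acc ds = some (ds.foldl (fun a c => 10 * a + (c.toNat - 48)) acc) := by
  intro ds
  induction ds with
  | nil => intro acc _; rfl
  | cons c rest ih =>
      intro acc h
      have hc := h c (by simp)
      rw [pvDigitsGo.eq_def]
      simp only [hc, if_true, List.foldl_cons]
      exact ih _ (fun x hx => h x (by simp [hx]))

theorem pv_digits?_digits (ds : List Char) (hne : ds ≠ []) (h : ∀ c ∈ ds, c.isDigit = true) :
    pvDigits? ds = some (ds.foldl (fun a c => 10 * a + (c.toNat - 48)) 0) := by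
  cases ds with
  | nil => exact absurd rfl hne
  | cons c rest =>
      have hc := h c (by simp)
      rw [pvDigits?.eq_def]
      simp only [hc, if_true, List.foldl_cons]
      rw [pv_go_digits rest _ (fun x hx => h x (by simp [hx]))]
      norm_num

theorem pv_int?_digits (ds : List Char) (hne : ds ≠ []) (h : ∀ c ∈ ds, c.isDigit = true)
    (hlen : ds.length ≤ 4300) :
    pvInt? ds = some ((ds.foldl (fun a c => 10 * a + (c.toNat - 48)) 0 : Nat) : Int) := by
  have hds : List.dropWhile PySem.Int.isIntSpace ds = ds := by
    cases ds with
    | nil => rfl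
    | cons c rest => simp [(pv_digit_ne c (h c (by simp))).2.2.2]
  have hrev : List.dropWhile PySem.Int.isIntSpace ds.reverse = ds.reverse := by
    cases hr : ds.reverse with
    | nil => rfl
    | cons c rest =>
        have hc : c ∈ ds := by
          have : c ∈ ds.reverse := by rw [hr]; simp
          simpa using this
        simp [(pv_digit_ne c (h c hc)).2.2.2]
  unfold pvInt?
  simp only [hds, hrev, List.reverse_reverse]
  cases ds with
  | nil => exact absurd rfl hne
  | cons c rest =>
      obtain ⟨hm, hp, hu, _⟩ := pv_digit_ne c (h c (by simp))
      simp only [hm, hp, if_false]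
      have hfilter : (c :: rest).filter (fun x => x ≠ '_') = c :: rest := by
        rw [List.filter_eq_self]
        intro a ha
        simpa using (pv_digit_ne a (h a ha)).2.2.1
      rw [hfilter]
      rw [if_neg (by omega)]
      rw [pv_digits?_digits _ (by simp) h]
      rfl

-- ---- mod-97 arithmetic through the fold ----
theorem pv_mod_mod (r : Int) : PySem.Int.mod (PySem.Int.mod r 97) 97 = PySem.Int.mod r 97 := by
  simp only [PySem.Int.mod_eq_emod_of_pos (show (0:Int) < 97 by norm_num)]
  exact Int.emod_emod_of_dvd r dvd_rfl

theorem pv_mod_congr (a b d : Int) (h : PySem.Int.mod a 97 = PySem.Int.mod b 97) :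
    PySem.Int.mod (a * 10 + d) 97 = PySem.Int.mod (b * 10 + d) 97 := by
  simp only [PySem.Int.mod_eq_emod_of_pos (show (0:Int) < 97 by norm_num)] at h ⊢
  exact (Int.ModEq.add_right d (Int.ModEq.mul_right 10 h))

theorem pv_modfold (ds : List Char) : ∀ r : Int,
    ds.foldl (fun a c => PySem.Int.mod (a * 10 + ((c.toNat : Int) - 48)) 97) (PySem.Int.mod r 97)
      = PySem.Int.mod (ds.foldl (fun a c => a * 10 + ((c.toNat : Int) - 48)) r) 97 := by
  induction ds with
  | nil => intro r; rfl
  | cons c rest ih =>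
      intro r
      simp only [List.foldl_cons]
      rw [pv_mod_congr _ r _ (pv_mod_mod r), ih (r * 10 + ((c.toNat : Int) - 48))]

theorem pv_cast_fold (ds : List Char) : ∀ acc : Nat, (∀ c ∈ ds, 48 ≤ c.toNat) →
    ((ds.foldl (fun a c => 10 * a + (c.toNat - 48)) acc : Nat) : Int)
      = ds.foldl (fun a c => a * 10 + ((c.toNat : Int) - 48)) (acc : Int) := by
  induction ds with
  | nil => intro acc _; rfl
  | cons c rest ih =>
      intro acc h
      simp only [List.foldl_cons]
      rw [ih _ (fun x hx => h x (by simp [hx]))]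
      congr 1
      have h48 := h c (by simp)
      push_cast [Nat.cast_sub h48]
      ring

-- ---- B's per-character step on a digit ----
theorem pv_step_digit (c : Char) (hc : c.isDigit = true) (r : Int) :
    pvStep (some r) c = some (PySem.Int.mod (r * 10 + ((c.toNat : Int) - 48)) 97) := by
  have h48 := (pv_isDigit_iff c).mp hc
  have h1 : pvInt? [c] = some (((c.toNat - 48 : Nat) : Int)) := by
    rw [pv_int?_digits [c] (by simp) (by simpa using hc) (by simp)]
    norm_num
  unfold pvStep
  rw [h1]
  rw [show ((c.toNat - 48 : Nat) : Int) = (c.toNat : Int) - 48 from by push_cast [Nat.cast_sub h48.1]; ring]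

theorem pv_fold_step (ds : List Char) : ∀ r : Int, (∀ c ∈ ds, c.isDigit = true) →
    ds.foldl pvStep (some r)
      = some (ds.foldl (fun a c => PySem.Int.mod (a * 10 + ((c.toNat : Int) - 48)) 97) r) := by
  induction ds with
  | nil => intro r _; rfl
  | cons c rest ih =>
      intro r h
      simp only [List.foldl_cons]
      rw [pv_step_digit c (h c (by simp)) r]
      exact ih _ (fun x hx => h x (by simp [hx]))

-- ---- the expansion of one country_code character is a short digit run ----
theorem pv_exp_facts (c : Char) (h48 : 48 ≤ c.toNat) (h126 : c.toNat ≤ 126) :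
    (∀ x ∈ pvExp c, x.isDigit = true) ∧ (pvExp c).length = pvExpLen c := by
  unfold pvExp pvExpLen
  by_cases hd : 48 ≤ c.toNat ∧ c.toNat ≤ 57
  · rw [if_pos ((pv_isdigit_iff c).mpr hd), if_pos hd]
    constructor
    · intro x hx
      simp only [List.mem_singleton] at hx
      subst hx
      exact (pv_isDigit_iff x).mpr hd
    · rfl
  · have hnd : PySem.Chars.isdigit c = false := by
      rcases Bool.eq_false_or_eq_true (PySem.Chars.isdigit c) with h | h
      · exact absurd ((pv_isdigit_iff c).mp h) hd
      · exact h
    rw [if_neg (by simp [hnd]), if_neg hd]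
    have hu := pv_upper_toNat c h126
    set u := (PySem.Chars.upperChar c).toNat with hudef
    have hub : 58 ≤ u ∧ u ≤ 126 := by rw [hu]; split <;> omega
    have hpos : ¬ ((u : Int) - 55 < 0) := by omega
    have htn : ((u : Int) - 55).toNat = u - 55 := by omega
    unfold PySem.Int.toChars
    rw [if_neg hpos, htn]
    have hk := pv_toDigits_facts (u - 55) (by omega) (by omega)
    constructor
    · intro x hx
      exact List.all_eq_true.mp hk.1 x hx
    · rw [hk.2, ← hu]
      split_ifs <;> omega

-- ---- assembly ----
theorem pv_main (country_code bban : String)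
    (hdom : Dom_generate_valid_iban country_code bban)
    (hpre : Pre_generate_valid_iban country_code bban) :
    generate_valid_iban country_code bban = generate_valid_iban_alt country_code bban := by
  obtain ⟨hcc', hbb', hlen⟩ := hpre
  have hcc : ∀ c ∈ country_code.toList, 48 ≤ c.toNat := by
    intro c hc
    simpa using List.all_eq_true.mp hcc' c hc
  have hbb : ∀ c ∈ bban.toList, c.isDigit = true := fun c hc => List.all_eq_true.mp hbb' c hc
  have hdomcc : ∀ c ∈ country_code.toList, c.toNat ≤ 126 := by
    intro c hcm
    have := hdom
    unfold Dom_generate_valid_iban pvDomStr at this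
    simp only [Bool.and_eq_true, List.all_eq_true] at this
    have hb := this.1 c hcm
    unfold pvDomChar at hb
    simp only [Bool.or_eq_true, Bool.and_eq_true, decide_eq_true_eq, beq_iff_eq] at hb
    have h48 := hcc c hcm
    omega
  set chars := country_code.toList ++ ['0', '0'] with hchars_def
  have hchars : ∀ c ∈ chars, 48 ≤ c.toNat ∧ c.toNat ≤ 126 := by
    intro c hcm
    rw [hchars_def] at hcm
    rcases List.mem_append.mp hcm with h | h
    · exact ⟨hcc c h, hdomcc c h⟩
    · simp only [List.mem_cons] at h
      rcases h with rfl | rfl | h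
      · exact ⟨by decide, by decide⟩
      · exact ⟨by decide, by decide⟩
      · simp at h
  -- A's suffix is chars.flatMap pvExp
  have hfun : (fun (acc : List Char) c =>
      if PySem.Chars.isdigit c then acc ++ [c]
      else acc ++ PySem.Int.toChars (((PySem.Chars.upperChar c).toNat : Int) - 55))
      = fun acc c => acc ++ pvExp c := by
    funext acc c
    unfold pvExp
    by_cases h : PySem.Chars.isdigit c <;> simp [h]
  have hsuffix : chars.foldl (fun acc c =>
      if PySem.Chars.isdigit c then acc ++ [c]
      else acc ++ PySem.Int.toChars (((PySem.Chars.upperChar c).toNat : Int) - 55)) []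
      = chars.flatMap pvExp := by
    rw [hfun, PySem.List.foldl_append_eq_flatMap]
    rfl
  set num_str := bban.toList ++ chars.flatMap pvExp with hnum_def
  have hdignum : ∀ c ∈ num_str, c.isDigit = true := by
    intro c hcm
    rw [hnum_def] at hcm
    rcases List.mem_append.mp hcm with h | h
    · exact hbb c h
    · obtain ⟨x, hx, hcx⟩ := List.mem_flatMap.mp h
      exact ((pv_exp_facts x (hchars x hx).1 (hchars x hx).2).1 c hcx)
  have hlenflat : (chars.flatMap pvExp).length = (chars.map pvExpLen).sum := by
    rw [List.length_flatMap]
    congr 1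
    exact List.map_congr_left (fun x hx => (pv_exp_facts x (hchars x hx).1 (hchars x hx).2).2)
  have hnum_len : num_str.length ≤ 4300 := by
    rw [hnum_def, List.length_append, hlenflat]
    exact hlen
  have hnum_ne : num_str ≠ [] := by
    rw [hnum_def, hchars_def]
    have h0 : pvExp '0' = ['0'] := by decide
    rw [List.flatMap_append]
    simp [h0]
  -- evaluate A
  have hA := pv_int?_digits num_str hnum_ne hdignum hnum_len
  have hcast := pv_cast_fold num_str 0 (fun c hc => ((pv_isDigit_iff c).mp (hdignum c hc)).1)
  simp only [Nat.cast_zero] at hcast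
  -- evaluate B's remainder
  have hfunB : (fun (r : Option Int) c =>
      if PySem.Chars.isdigit c then pvStep r c
      else (PySem.Int.toChars (((PySem.Chars.upperChar c).toNat : Int) - 55)).foldl pvStep r)
      = fun r c => (pvExp c).foldl pvStep r := by
    funext r c
    unfold pvExp
    by_cases h : PySem.Chars.isdigit c <;> simp [h]
  have hB : (chars.foldl (fun r c =>
      if PySem.Chars.isdigit c then pvStep r c
      else (PySem.Int.toChars (((PySem.Chars.upperChar c).toNat : Int) - 55)).foldl pvStep r)
      (bban.toList.foldl pvStep (some 0)))
      = some (PySem.Int.mod (num_str.foldl (fun a c => a * 10 + ((c.toNat : Int) - 48)) 0) 97) := by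
    rw [hfunB, ← List.foldl_flatMap, ← List.foldl_append, ← hnum_def]
    rw [pv_fold_step num_str 0 hdignum]
    congr 1
    have hm := pv_modfold num_str 0
    rw [show PySem.Int.mod 0 97 = (0 : Int) from by decide] at hm
    exact hm
  unfold generate_valid_iban generate_valid_iban_alt
  simp only [hsuffix, ← hchars_def, ← hnum_def, hA, hB]
  rw [hcast]

-- ===== VERDICT (by name: the statement is the Claim_ definition above) =====
theorem generate_valid_iban_spec : Claim_equal_generate_valid_iban := by
  intro country_code bban hdom hpre
  unfold Spec_generate_valid_iban
  exact pv_main country_code bban hdom hpre
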